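-- pv_equiv track=rewrite | github.com/PharmaSajH/bears-live | build_reco.py | respects_team_limit
-- ===== SOURCE A (Python) =====
-- from typing import Dict, List, Tuple, Any
--
-- def respects_team_limit(
--     squad_ids: List[int],
--     player_lookup: Dict[int, Dict],
--     team_key: str,
-- ) -> bool:
--     """
--     Check FPL's 'max 3 players per club' rule.
--     """
--     counts: Dict[int, int] = {}
--     for pid in squad_ids:
--         info = player_lookup.get(pid, {})
--         team_id = info.get(team_key)
--         if team_id is None:
--             continue
--         team_id = int(team_id)
--         counts[team_id] = counts.get(team_id, 0) + 1
--         if counts[team_id] > 3: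
--             return False
--     return True
-- ===== SOURCE B (Python) =====
-- from typing import Dict, List
--
-- def respects_team_limit(
--     squad_ids: List[int],
--     player_lookup: Dict[int, Dict],
--     team_key: str,
-- ) -> bool:
--     """
--     Check FPL's 'max 3 players per club' rule by sort-then-scan:
--     sort the resolvable team ids; a club has more than 3 players
--     iff some element equals the element 3 positions later.
--     """
--     tids = sorted(
--         int(t)
--         for t in (player_lookup.get(pid, {}).get(team_key) for pid in squad_ids)
--         if t is not None
--     )
--     return all(x != y for x, y in zip(tids, tids[3:]))
-- ===== Notes on version B (the rewrite author's own statement) =====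
-- stated objective: alternative
-- what changed: Replaced A's running counter dict with early exit by sort-then-scan: collect the resolvable team ids, sort them, and check that no element equals the element 3 positions later (a sorted list has a value occurring >3 times iff tids[i] == tids[i+3] for some i); no counts are maintained at all.
import Mathlib
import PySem

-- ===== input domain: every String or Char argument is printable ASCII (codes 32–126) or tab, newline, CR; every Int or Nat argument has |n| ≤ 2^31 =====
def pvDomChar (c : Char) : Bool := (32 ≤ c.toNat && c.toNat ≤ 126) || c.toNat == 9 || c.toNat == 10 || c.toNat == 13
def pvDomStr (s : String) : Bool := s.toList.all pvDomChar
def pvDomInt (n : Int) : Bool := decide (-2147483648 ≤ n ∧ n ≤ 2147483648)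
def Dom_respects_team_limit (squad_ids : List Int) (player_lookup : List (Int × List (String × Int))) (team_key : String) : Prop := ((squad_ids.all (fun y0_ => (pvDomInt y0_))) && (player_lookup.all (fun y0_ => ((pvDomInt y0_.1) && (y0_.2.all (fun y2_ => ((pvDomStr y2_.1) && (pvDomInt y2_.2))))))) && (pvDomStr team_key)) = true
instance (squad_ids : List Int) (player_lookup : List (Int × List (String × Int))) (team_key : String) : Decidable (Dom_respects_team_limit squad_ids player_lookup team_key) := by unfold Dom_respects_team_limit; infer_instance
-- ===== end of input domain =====

-- B replaces A's running counter dict (with early exit) by sort-then-scan: sort the resolvable team ids and check no element equals the one 3 positions later; objective: alternative algorithm, not speed.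


-- ===== PORT A =====
-- helper: the lookup 'player_lookup.get(pid, {}).get(team_key)' (int() is the identity on these Int values)
def pvTid (player_lookup : List (Int × List (String × Int))) (team_key : String) (pid : Int) : Option Int :=
  (PySem.Dict.mk ((PySem.Dict.mk player_lookup).getD pid [])).get? team_key

-- A's loop: running counter dict with early return when a count exceeds 3
def pvLoopA (player_lookup : List (Int × List (String × Int))) (team_key : String)
    (counts : PySem.Dict Int Int) : List Int → Bool
  | [] => true
  | pid :: rest =>
    match pvTid player_lookup team_key pid with
    | none => pvLoopA player_lookup team_key counts rest
    | some team_id =>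
      let counts' := counts.insert team_id (counts.getD team_id 0 + 1)
      if counts'.getD team_id 0 > 3 then false
      else pvLoopA player_lookup team_key counts' rest

def respects_team_limit (squad_ids : List Int) (player_lookup : List (Int × List (String × Int))) (team_key : String) : Bool :=
  pvLoopA player_lookup team_key PySem.Dict.empty squad_ids

-- ===== PORT B =====
-- B: 'sorted(int(t) for t in (…get(team_key)…) if t is not None)' — the generator is a filterMap, then sorted
def pvSortedTids (squad_ids : List Int) (player_lookup : List (Int × List (String × Int))) (team_key : String) : List Int :=
  PySem.List.sorted (squad_ids.filterMap (pvTid player_lookup team_key)) (fun x => x) false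

-- 'all(x != y for x, y in zip(tids, tids[3:]))'
def respects_team_limit_alt (squad_ids : List Int) (player_lookup : List (Int × List (String × Int))) (team_key : String) : Bool :=
  let tids := pvSortedTids squad_ids player_lookup team_key
  (tids.zip (PySem.List.slice tids (some 3) none)).all (fun p => p.1 != p.2)

-- ===== PRECONDITION & SPEC =====
def Spec_respects_team_limit (squad_ids : List Int) (player_lookup : List (Int × List (String × Int))) (team_key : String) (out : Bool) : Prop := out = respects_team_limit_alt squad_ids player_lookup team_key
instance (squad_ids : List Int) (player_lookup : List (Int × List (String × Int))) (team_key : String) (out : Bool) : Decidable (Spec_respects_team_limit squad_ids player_lookup team_key out) := by unfold Spec_respects_team_limit; infer_instance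

-- ===== CLAIM (what is proved, stated in full; the proofs are below) =====
def Claim_equal_respects_team_limit : Prop := ∀ (squad_ids : List Int) (player_lookup : List (Int × List (String × Int))) (team_key : String), Dom_respects_team_limit squad_ids player_lookup team_key → Spec_respects_team_limit squad_ids player_lookup team_key (respects_team_limit squad_ids player_lookup team_key)

-- ===== LEMMAS AND PROOFS =====
-- the filtered team-id list, proof-side view
def pvTids (player_lookup : List (Int × List (String × Int))) (team_key : String) (l : List Int) : List Int :=
  l.filterMap (pvTid player_lookup team_key)

-- A's loop, characterised: with every running count ≤ 3, it returns true iff no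
-- total count (running + remaining occurrences) exceeds 3
lemma pvLoopA_char (player_lookup : List (Int × List (String × Int))) (team_key : String)
    (l : List Int) (counts : PySem.Dict Int Int) (h : ∀ t, counts.getD t 0 ≤ 3) :
    pvLoopA player_lookup team_key counts l = true ↔
      (∀ t, counts.getD t 0 + ((pvTids player_lookup team_key l).count t : Int) ≤ 3) := by
  induction l generalizing counts with
  | nil => simpa [pvLoopA, pvTids] using h
  | cons pid rest ih =>
    simp only [pvLoopA, pvTids, List.filterMap_cons]
    cases htid : pvTid player_lookup team_key pid with
    | none => exact ih counts h
    | some t =>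
      simp only [PySem.Dict.getD_insert_self]
      by_cases hgt : counts.getD t 0 + 1 > 3
      · simp only [if_pos hgt]
        constructor
        · intro hfalse; cases hfalse
        · intro hall
          exfalso
          have := hall t
          simp at this
          omega
      · simp only [if_neg hgt]
        have h' : ∀ u, (counts.insert t (counts.getD t 0 + 1)).getD u 0 ≤ 3 := by
          intro u
          rw [PySem.Dict.getD_insert]
          split_ifs with hu
          · omega
          · exact h u
        rw [ih _ h']
        constructor
        · intro hall u
          have := hall u
          rw [PySem.Dict.getD_insert] at this
          by_cases hu : u = t <;>
            simp [pvTids, hu, List.count_cons] at this ⊢ <;> omega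
        · intro hall u
          have := hall u
          rw [PySem.Dict.getD_insert]
          by_cases hu : u = t <;>
            simp [pvTids, hu, List.count_cons] at this ⊢ <;> omega

-- sorted window scan: on a ≤-sorted Int list, count facts behind B's check

lemma count_le_two (r : List Int) (hp : r.Pairwise (· ≤ ·)) (a : Int)
    (ha : ∀ x ∈ r, a ≤ x) (h3 : 3 ≤ r.length) (hne : a ≠ r[2]) :
    r.count a ≤ 2 := by
  have hd : (r.drop 2).count a = 0 := by
    rw [List.count_eq_zero]
    intro hmem
    obtain ⟨i, hi, hiv⟩ := List.mem_iff_getElem.mp hmem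
    have hlen : i < r.length - 2 := by simpa using hi
    have hiv' : r[2 + i]'(by omega) = a := by
      rw [← hiv]; rw [List.getElem_drop]
    have h2i : r[2]'(by omega) ≤ r[2 + i]'(by omega) := by
      rcases Nat.eq_zero_or_pos i with h0 | h0
      · subst h0; simp
      · exact List.pairwise_iff_getElem.mp hp 2 (2 + i) (by omega) (by omega) (by omega)
    have hle : a ≤ r[2] := ha _ (List.getElem_mem _)
    exact hne (le_antisymm hle (hiv' ▸ h2i))
  have hcc : r.count a = (r.take 2).count a + (r.drop 2).count a := by
    conv_lhs => rw [← List.take_append_drop 2 r]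
    rw [List.count_append]
  have h1 := List.length_take_le 2 r
  have h2 := List.count_le_length (l := r.take 2) (a := a)
  omega


lemma count_ge_three (r : List Int) (hp : r.Pairwise (· ≤ ·)) (a : Int)
    (ha : ∀ x ∈ r, a ≤ x) (h3 : 3 ≤ r.length) (heq : a = r[2]) :
    3 ≤ r.count a := by
  have hlen : (r.take 3).length = 3 := by simp; omega
  have hallmem : ∀ b ∈ r.take 3, a = b := by
    intro b hb
    obtain ⟨i, hi, hiv⟩ := List.mem_iff_getElem.mp hb
    rw [hlen] at hi
    have hiv' : r[i]'(by omega) = b := by rw [← hiv, List.getElem_take]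
    have h1 : a ≤ r[i]'(by omega) := ha _ (List.getElem_mem _)
    have h2 : r[i]'(by omega) ≤ r[2]'(by omega) := by
      rcases Nat.lt_or_ge i 2 with h | h
      · exact List.pairwise_iff_getElem.mp hp i 2 (by omega) (by omega) h
      · have : i = 2 := by omega
        subst this; rfl
    rw [hiv'] at h1 h2
    omega
  have htake : (r.take 3).count a = 3 := by
    rw [List.count_eq_length.mpr hallmem, hlen]
  have hcc : r.count a = (r.take 3).count a + (r.drop 3).count a := by
    conv_lhs => rw [← List.take_append_drop 3 r]
    rw [List.count_append]
  omega

lemma zip3_sorted_iff (l : List Int) (hp : l.Pairwise (· ≤ ·)) :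
    ((l.zip (l.drop 3)).all (fun p => p.1 != p.2) = true) ↔ ∀ t, l.count t ≤ 3 := by
  induction l with
  | nil => simp
  | cons a r ih =>
    obtain ⟨ha, hr⟩ := List.pairwise_cons.mp hp
    have hdrop : (a :: r).drop 3 = r.drop 2 := rfl
    rcases Nat.lt_or_ge r.length 3 with hlen | h3
    · have hnil : r.drop 2 = [] := by
        apply List.eq_nil_of_length_eq_zero
        rw [List.length_drop]; omega
      have hz : (a :: r).zip ((a :: r).drop 3) = [] := by
        rw [hdrop, hnil, List.zip_nil_right]
      rw [hz]
      simp only [List.all_nil, true_iff]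
      intro t
      have := List.count_le_length (l := a :: r) (a := t)
      simp at this
      omega
    · have hsplit : r.drop 2 = r[2] :: r.drop 3 := List.drop_eq_getElem_cons (by omega)
      have hz : (a :: r).zip ((a :: r).drop 3) = (a, r[2]) :: r.zip (r.drop 3) := by
        rw [hdrop, hsplit]; rfl
      rw [hz]
      simp only [List.all_cons, Bool.and_eq_true, bne_iff_ne, ne_eq]
      rw [ih hr]
      constructor
      · rintro ⟨hne, hcount⟩ t
        by_cases ht : t = a
        · subst ht
          have h2 : r.count t ≤ 2 := count_le_two r hr t ha h3 hne
          rw [List.count_cons_self]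
          omega
        · simpa [List.count_cons, Ne.symm ht] using hcount t
      · intro hall
        refine ⟨?_, fun t => le_trans List.count_le_count_cons (hall t)⟩
        intro haeq
        have hge : 3 ≤ r.count a := count_ge_three r hr a ha h3 haeq
        have := hall a
        rw [List.count_cons_self] at this
        omega

-- ===== VERDICT (by name: the statement is the Claim_ definition above) =====
theorem respects_team_limit_spec : Claim_equal_respects_team_limit := by
  intro squad_ids player_lookup team_key _
  unfold Spec_respects_team_limit respects_team_limit respects_team_limit_alt pvSortedTids
  apply Bool.eq_iff_iff.mpr
  rw [pvLoopA_char player_lookup team_key squad_ids PySem.Dict.empty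
      (by intro t; simp [PySem.Dict.getD_empty])]
  have hsl : PySem.List.slice
      (PySem.List.sorted (List.filterMap (pvTid player_lookup team_key) squad_ids) (fun x => x) false)
      (some 3) none
      = (PySem.List.sorted (List.filterMap (pvTid player_lookup team_key) squad_ids) (fun x => x) false).drop 3 := by
    rw [PySem.List.slice_from _ (by norm_num : (0 : Int) ≤ 3)]
    rfl
  simp only [hsl]
  rw [zip3_sorted_iff _ (PySem.List.sorted_pairwise _ _)]
  have hperm := PySem.List.sorted_perm (squad_ids.filterMap (pvTid player_lookup team_key)) (fun x : Int => x) false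
  constructor
  · intro hall t
    have h1 := hall t
    rw [hperm.count_eq]
    simp [PySem.Dict.getD_empty, pvTids] at h1
    exact_mod_cast h1
  · intro hall t
    have h1 := hall t
    rw [hperm.count_eq] at h1
    simp [PySem.Dict.getD_empty, pvTids]
    exact_mod_cast h1
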